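-- pv_equiv track=rewrite | github.com/javierrcastroo/Integraci-n-Rob-tica-Visi-n-RL | catkin_ws/src/vc_battleship/src/game_logic.py | _validate_ship2
-- ===== SOURCE A (Python) =====
-- def _validate_ship2(cells):
--     if len(cells) != 2:
--         return False
--
--     rows = {r for r, _ in cells}
--     cols = {c for _, c in cells}
--     if len(rows) == 1:
--         seq = sorted(c for _, c in cells)
--     elif len(cols) == 1:
--         seq = sorted(r for r, _ in cells)
--     else:
--         return False
--
--     return seq[1] - seq[0] == 1
-- ===== SOURCE B (Python) =====
-- def _validate_ship2(cells):
--     if len(cells) != 2: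
--         return False
--     (r1, c1), (r2, c2) = cells
--     return abs(r1 - r2) + abs(c1 - c2) == 1
-- ===== Notes on version B (the rewrite author's own statement) =====
-- stated objective: simpler
-- what changed: Replaces the set-building, row/column branching and sorting with a single closed-form Manhattan-distance-1 test on the two unpacked cells.
import Mathlib
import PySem

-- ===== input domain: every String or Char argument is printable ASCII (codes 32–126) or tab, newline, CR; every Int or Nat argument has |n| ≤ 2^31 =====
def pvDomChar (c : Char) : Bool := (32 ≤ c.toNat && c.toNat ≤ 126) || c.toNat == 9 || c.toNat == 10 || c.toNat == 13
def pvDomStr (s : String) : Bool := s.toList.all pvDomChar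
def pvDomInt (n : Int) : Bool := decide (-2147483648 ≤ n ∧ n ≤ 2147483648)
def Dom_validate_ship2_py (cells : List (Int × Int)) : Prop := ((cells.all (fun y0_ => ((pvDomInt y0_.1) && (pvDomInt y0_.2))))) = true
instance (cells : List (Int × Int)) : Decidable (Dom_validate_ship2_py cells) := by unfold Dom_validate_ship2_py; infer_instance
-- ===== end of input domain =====

-- B replaces A's set-building, row/column branching and sorting with a single
-- closed-form Manhattan-distance-1 test on the two unpacked cells (simpler).


-- ===== PORT A =====
def validate_ship2_py (cells : List (Int × Int)) : Bool :=
  if cells.length ≠ 2 then false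
  else
    let rows := PySem.Set.ofList (cells.map Prod.fst)
    let cols := PySem.Set.ofList (cells.map Prod.snd)
    if rows.length = 1 then
      let seq := PySem.List.sorted (cells.map Prod.snd) (fun x => x) false
      -- seq[1] - seq[0]: in range since len(cells) = 2
      PySem.List.pyGetD seq 1 0 - PySem.List.pyGetD seq 0 0 == 1
    else if cols.length = 1 then
      let seq := PySem.List.sorted (cells.map Prod.fst) (fun x => x) false
      PySem.List.pyGetD seq 1 0 - PySem.List.pyGetD seq 0 0 == 1
    else false

-- ===== PORT B =====
def validate_ship2_py_alt (cells : List (Int × Int)) : Bool :=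
  match cells with
  | [(r1, c1), (r2, c2)] => (r1 - r2).natAbs + (c1 - c2).natAbs == 1
  | _ => false

-- ===== PRECONDITION & SPEC =====
def Spec_validate_ship2_py (cells : List (Int × Int)) (out : Bool) : Prop := out = validate_ship2_py_alt cells
instance (cells : List (Int × Int)) (out : Bool) : Decidable (Spec_validate_ship2_py cells out) := by unfold Spec_validate_ship2_py; infer_instance

-- ===== CLAIM (what is proved, stated in full; the proofs are below) =====
def Claim_equal_validate_ship2_py : Prop := ∀ (cells : List (Int × Int)), Dom_validate_ship2_py cells → Spec_validate_ship2_py cells (validate_ship2_py cells)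

-- ===== LEMMAS AND PROOFS =====

-- ===== VERDICT (by name: the statement is the Claim_ definition above) =====
theorem validate_ship2_py_spec : Claim_equal_validate_ship2_py := by
  intro cells _
  unfold Spec_validate_ship2_py
  match cells with
  | [] => rfl
  | [_] => rfl
  | _ :: _ :: _ :: _ => rfl
  | [(r1, c1), (r2, c2)] =>
    by_cases hr : r1 = r2 <;> by_cases hc : c1 = c2 <;>
      simp [validate_ship2_py, validate_ship2_py_alt,
        PySem.Set.ofList, PySem.Set.add, PySem.List.sorted, PySem.List.insertBy,
        PySem.List.pyGetD, PySem.List.pyIdx?, PySem.List.pyGet?, hr, hc] <;>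
      split_ifs <;> simp_all <;> omega
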